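-- pv_equiv track=rewrite | github.com/yangeorget/coding-problems | problems/boggle.py | compute_positions
-- ===== SOURCE A (Python) =====
-- def compute_positions(board):
--     positions = {}
--     for i, line in enumerate(board):
--         for j, letter in enumerate(line):
--             if letter not in positions:
--                 positions[letter] = []
--             positions[letter].append((i, j))
--     return positions
-- ===== SOURCE B (Python) =====
-- def compute_positions(board):
--     # Two-pass: flatten the board into (letter, position) cells, then build the
--     # result per distinct letter (first-occurrence order) by filtering the cells.
--     cells = [(letter, (i, j))
--              for i, line in enumerate(board)
--              for j, letter in enumerate(line)]
--     letters = dict.fromkeys(letter for letter, _ in cells)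
--     return {letter: [pos for l, pos in cells if l == letter] for letter in letters}
-- ===== Notes on version B (the rewrite author's own statement) =====
-- stated objective: alternative
-- what changed: A fills the dict in one hashing pass appending each cell as it is visited; B first flattens the board into an explicit (letter, position) cell list, collects the distinct letters in first-occurrence order, and then builds each letter's position list by a separate filtering pass over the cells.
import Mathlib
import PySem

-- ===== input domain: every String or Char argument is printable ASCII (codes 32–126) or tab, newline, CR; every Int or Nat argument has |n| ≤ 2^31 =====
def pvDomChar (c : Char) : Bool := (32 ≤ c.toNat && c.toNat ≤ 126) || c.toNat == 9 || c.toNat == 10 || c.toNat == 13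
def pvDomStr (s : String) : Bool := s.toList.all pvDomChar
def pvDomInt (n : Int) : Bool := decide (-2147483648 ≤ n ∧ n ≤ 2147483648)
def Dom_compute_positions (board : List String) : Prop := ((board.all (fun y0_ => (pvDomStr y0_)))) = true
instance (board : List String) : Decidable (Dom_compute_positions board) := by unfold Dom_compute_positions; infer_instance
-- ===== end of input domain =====

-- B replaces A's single hashing pass with an explicit flattened cell list, an ordered dedup of
-- the letters and one filtering pass per distinct letter (alternative decomposition, same value).

-- ===== PORT A =====
def compute_positions (board : List String) : List (String × List (Int × Int)) :=
  ((PySem.List.enumerate board 0).foldl (fun d p =>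
      (PySem.List.enumerate p.2.toList 0).foldl (fun d q =>
        let letter : String := String.ofList [q.2]
        let d' := if d.contains letter then d else d.insert letter ([] : List (Int × Int))
        d'.modify letter [] (· ++ [(p.1, q.1)])) d)
    PySem.Dict.empty).items

-- ===== PORT B =====
def compute_positions_alt (board : List String) : List (String × List (Int × Int)) :=
  let cells : List (String × (Int × Int)) :=
    (PySem.List.enumerate board 0).flatMap (fun p =>
      (PySem.List.enumerate p.2.toList 0).map (fun q => (String.ofList [q.2], (p.1, q.1))))
  let letters := PySem.List.dedup (cells.map (·.1))   -- dict.fromkeys: first occurrences, in order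
  ((letters.foldl (fun d letter =>
      d.insert letter ((cells.filter (fun c => c.1 == letter)).map (·.2)))
    PySem.Dict.empty).items)

-- ===== PRECONDITION & SPEC =====
def Spec_compute_positions (board : List String) (out : List (String × List (Int × Int))) : Prop := out = compute_positions_alt board
instance (board : List String) (out : List (String × List (Int × Int))) : Decidable (Spec_compute_positions board out) := by unfold Spec_compute_positions; infer_instance

-- ===== CLAIM (what is proved, stated in full; the proofs are below) =====
def Claim_equal_compute_positions : Prop := ∀ (board : List String), Dom_compute_positions board → Spec_compute_positions board (compute_positions board)

-- ===== LEMMAS AND PROOFS =====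

-- the flattened cell list both ports traverse
def pvCellsOf (board : List String) : List (String × (Int × Int)) :=
  (PySem.List.enumerate board 0).flatMap (fun p =>
    (PySem.List.enumerate p.2.toList 0).map (fun q => (String.ofList [q.2], (p.1, q.1))))

-- A's two-step "ensure present, then append" is one modify step
theorem pv_step_eq_modify {κ : Type} [BEq κ] [LawfulBEq κ] (d : PySem.Dict κ (List (Int × Int))) (k : κ) (x : Int × Int) :
    (let d' := if d.contains k then d else d.insert k ([] : List (Int × Int))
     d'.modify k [] (· ++ [x])) = d.modify k [] (· ++ [x]) := by
  by_cases h : d.contains k = true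
  · simp [h]
  · simp only [Bool.not_eq_true] at h
    simp only [h, Bool.false_eq_true, if_false]
    apply PySem.Dict.ext
    have hins : (d.insert k ([] : List (Int × Int))).contains k = true :=
      PySem.Dict.contains_insert_self d k []
    have hnomem : ∀ p ∈ d.items, (p.1 == k) = false := by
      intro p hp
      have hh := h
      simp [PySem.Dict.contains] at hh
      simpa using hh p.1 p.2 (by simpa using hp)
    simp only [PySem.Dict.modify, PySem.Dict.getD_insert_self,
      PySem.Dict.getD_of_not_contains d _ h]
    rw [PySem.Dict.items_insert_of_contains _ _ hins,
        PySem.Dict.items_insert_of_not_contains d _ h,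
        PySem.Dict.items_insert_of_not_contains d _ h]
    simp only [List.map_append]
    congr 1
    · apply (List.map_congr_left ?_).trans (List.map_id _)
      intro p hp
      simp [hnomem p hp]
    · simp

-- items of a dict with Nodup keys are its keys mapped to their values
theorem pv_items_eq_keys_map {κ ν : Type} [BEq κ] [LawfulBEq κ]
    (d : PySem.Dict κ ν) (d0 : ν) (h : d.keys.Nodup) :
    d.items = d.keys.map (fun k => (k, d.getD k d0)) := by
  simp only [PySem.Dict.keys, List.map_map]
  symm
  apply (List.map_congr_left ?_).trans (List.map_id _)
  intro p hp
  simp only [Function.comp_apply, id]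
  have := PySem.Dict.getD_of_mem_items d (k := p.1) (v := p.2) (by simpa using hp) h d0
  simp [this]

theorem pv_foldl_flatMap {α β γ : Type} (g : α → List β) (f : γ → β → γ) :
    ∀ (l : List α) (init : γ),
      (l.flatMap g).foldl f init = l.foldl (fun acc x => (g x).foldl f acc) init := by
  intro l
  induction l with
  | nil => intro init; rfl
  | cons x xs ih => intro init; simp [List.flatMap_cons, List.foldl_append, ih]

theorem pv_A_eq_modify_fold (board : List String) :
    compute_positions board =
      ((pvCellsOf board).foldl (fun d p => d.modify p.1 [] (· ++ [p.2])) PySem.Dict.empty).items := by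
  unfold compute_positions pvCellsOf
  rw [pv_foldl_flatMap]
  congr 1
  apply PySem.List.foldl_congr_mem
  intro d p _
  rw [List.foldl_map]
  apply PySem.List.foldl_congr_mem
  intro d' q _
  exact pv_step_eq_modify d' (String.ofList [q.2]) (p.1, q.1)

theorem pv_B_items (board : List String) :
    compute_positions_alt board =
      (PySem.List.dedup ((pvCellsOf board).map (·.1))).map
        (fun k => (k, ((pvCellsOf board).filter (fun c => c.1 == k)).map (·.2))) := by
  unfold compute_positions_alt
  show ((PySem.List.dedup ((pvCellsOf board).map (·.1))).foldl (fun d letter =>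
      d.insert letter (((pvCellsOf board).filter (fun c => c.1 == letter)).map (·.2)))
    PySem.Dict.empty).items = _
  rw [PySem.Dict.items_foldl_insert_fresh _ (fun k => k)
        (fun k => (((pvCellsOf board).filter (fun c => c.1 == k)).map (·.2)))
        PySem.Dict.empty
        (fun a _ => PySem.Dict.contains_empty a)
        (by simpa [PySem.List.dedup_eq_ofList] using PySem.Set.nodup_ofList ((pvCellsOf board).map (·.1)))]
  show PySem.Dict.empty.items ++ _ = _
  rw [show (PySem.Dict.empty : PySem.Dict String (List (Int × Int))).items = [] from rfl]
  simp

theorem pv_main_eq (board : List String) :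
    compute_positions board = compute_positions_alt board := by
  rw [pv_A_eq_modify_fold, pv_B_items]
  have hnodup : ((pvCellsOf board).foldl (fun d p => d.modify p.1 [] (· ++ [p.2])) PySem.Dict.empty).keys.Nodup := by
    apply PySem.Dict.nodup_keys_foldl_modify_key _ Prod.fst [] (fun _ p => (· ++ [p.2]))
    rw [show (PySem.Dict.empty : PySem.Dict String (List (Int × Int))).keys = [] from rfl]
    exact List.nodup_nil
  rw [pv_items_eq_keys_map _ ([] : List (Int × Int)) hnodup]
  rw [PySem.Dict.keys_foldl_modify_key _ Prod.fst [] (fun _ p => (· ++ [p.2]))]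
  simp only [PySem.Dict.keys]
  rw [show (PySem.Dict.empty : PySem.Dict String (List (Int × Int))).items.map Prod.fst = [] from rfl]
  rw [PySem.Set.update_nil_left, ← PySem.List.dedup_eq_ofList]
  apply List.map_congr_left
  intro k _
  rw [PySem.Dict.getD_foldl_modify_append]
  simp [PySem.Dict.getD_empty]

-- ===== VERDICT (by name: the statement is the Claim_ definition above) =====
theorem compute_positions_spec : Claim_equal_compute_positions := by
  intro board _
  unfold Spec_compute_positions
  exact pv_main_eq board
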